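-- pv_equiv track=rewrite | github.com/Somang-Kang/Algorithm-solving | 프로그래머스/3/12938. 최고의 집합/최고의 집합.py | solution
-- ===== SOURCE A (Python) =====
-- def solution(n, s):
--     answer = []
--
--     div_num = s//n
--     rem_num = s%n
--     if div_num ==0:
--         return [-1]
--     for i in range(n):
--         answer.append(div_num)
--         if i >= (n-rem_num):
--             answer[-1] += 1
--     return answer
-- ===== SOURCE B (Python) =====
-- def solution(n, s):
--     if s // n == 0:
--         return [-1]
--     # greedy: repeatedly take the ceiling of the remaining average as the
--     # largest remaining element, then distribute the rest among n-1 slots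
--     out = []
--     while n > 0:
--         c = -(-s // n)
--         out.append(c)
--         s -= c
--         n -= 1
--     out.reverse()
--     return out
-- ===== Notes on version B (the rewrite author's own statement) =====
-- stated objective: alternative
-- what changed: Replaces A's indexed loop that appends s//n and conditionally bumps the last element by a remainder-threshold test with a greedy pass: repeatedly take the ceiling of the remaining average -(-s//n) as the next element while decrementing s and n, then reverse, never computing the remainder or a threshold.
import Mathlib
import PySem

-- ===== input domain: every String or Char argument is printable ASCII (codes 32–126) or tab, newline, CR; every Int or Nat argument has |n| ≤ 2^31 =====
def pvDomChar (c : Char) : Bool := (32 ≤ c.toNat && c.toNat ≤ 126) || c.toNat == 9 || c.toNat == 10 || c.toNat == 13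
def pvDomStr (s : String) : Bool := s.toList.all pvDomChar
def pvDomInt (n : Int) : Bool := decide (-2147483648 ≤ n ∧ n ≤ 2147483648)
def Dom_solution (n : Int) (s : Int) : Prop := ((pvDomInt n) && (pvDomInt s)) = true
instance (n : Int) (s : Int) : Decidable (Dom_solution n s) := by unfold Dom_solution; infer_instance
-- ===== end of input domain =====

-- B is a greedy recursion: each step takes c = ceil(remaining s / remaining n)
-- as the last element and recurses on (n-1, s-c), instead of A's loop that
-- appends s//n and conditionally increments the last element past a threshold.


-- ===== PORT A =====
-- answer[-1] += 1 on the (nonempty) accumulator: replace the last element by itself + 1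
def incLast (xs : List Int) : List Int := xs.dropLast ++ [xs.getLast?.getD 0 + 1]

def solution (n : Int) (s : Int) : List Int :=
  let div_num := PySem.Int.floordiv s n
  let rem_num := PySem.Int.mod s n
  if div_num = 0 then [-1]
  else
    (PySem.List.pyRange 0 n 1).foldl
      (fun answer i =>
        let answer := answer ++ [div_num]
        if n - rem_num ≤ i then incLast answer else answer)
      []

-- ===== PORT B =====
-- the while loop: out.append(ceil of remaining average), s -= c, n -= 1; then out.reverse()
def goGreedy (n : Int) (s : Int) (out : List Int) : List Int :=
  if n ≤ 0 then out.reverse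
  else goGreedy (n - 1) (s - (-(PySem.Int.floordiv (-s) n))) (out ++ [-(PySem.Int.floordiv (-s) n)])
termination_by n.toNat
decreasing_by omega

def solution_alt (n : Int) (s : Int) : List Int :=
  if PySem.Int.floordiv s n = 0 then [-1]
  else goGreedy n s []

-- ===== PRECONDITION & SPEC =====
-- Pre_ excludes only n = 0, where Python's s//n raises ZeroDivisionError in both A and B.
def Pre_solution (n : Int) (_s : Int) : Prop := n ≠ 0
instance (n : Int) (s : Int) : Decidable (Pre_solution n s) := by unfold Pre_solution; infer_instance
def pvWitness_solution : Int × Int := (3, 11)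

def Spec_solution (n : Int) (s : Int) (out : List Int) : Prop := out = solution_alt n s
instance (n : Int) (s : Int) (out : List Int) : Decidable (Spec_solution n s out) := by unfold Spec_solution; infer_instance

-- ===== CLAIM (what is proved, stated in full; the proofs are below) =====
def Claim_equal_solution : Prop := ∀ (n : Int) (s : Int), Dom_solution n s → Pre_solution n s → Spec_solution n s (solution n s)

-- ===== LEMMAS AND PROOFS =====

lemma map_const_range (a b q : Int) :
    (PySem.List.pyRange a b 1).map (fun _ => q) = List.replicate (b - a).toNat q := by
  rw [List.map_const']
  simp [PySem.List.length_pyRange_one]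

-- A's loop produces the two uniform blocks, for n > 0 with div_num ≠ 0
lemma loop_block (n s : Int) (hpos : 0 < n) :
    (PySem.List.pyRange 0 n 1).foldl
      (fun answer i =>
        let answer := answer ++ [PySem.Int.floordiv s n]
        if n - PySem.Int.mod s n ≤ i then incLast answer else answer)
      []
    = List.replicate (n - PySem.Int.mod s n).toNat (PySem.Int.floordiv s n)
      ++ List.replicate (PySem.Int.mod s n).toNat (PySem.Int.floordiv s n + 1) := by
  set q := PySem.Int.floordiv s n with hq
  set r := PySem.Int.mod s n with hr
  have hstep : ∀ (acc : List Int) (i : Int),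
      (if n - r ≤ i then incLast (acc ++ [q]) else acc ++ [q])
        = acc ++ [if n - r ≤ i then q + 1 else q] := by
    intro acc i; by_cases h : n - r ≤ i <;> simp [h, incLast]
  rw [show (fun (answer : List Int) (i : Int) =>
        let answer := answer ++ [q]
        if n - r ≤ i then incLast answer else answer)
      = (fun (acc : List Int) (i : Int) => acc ++ [if n - r ≤ i then q + 1 else q])
    from funext fun a => funext fun i => hstep a i]
  rw [PySem.List.foldl_append_singleton_eq_map]
  have hge := PySem.Int.mod_nonneg (a := s) hpos
  have hlt := PySem.Int.mod_lt (a := s) hpos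
  rw [PySem.List.pyRange_one_append 0 (n - r) n (by omega) (by omega)]
  rw [List.map_append]
  have hA : (PySem.List.pyRange 0 (n - r) 1).map (fun i => if n - r ≤ i then q + 1 else q)
      = List.replicate (n - r).toNat q := by
    rw [List.map_congr_left (g := fun _ => q) ?_, map_const_range]
    · simp
    · intro i hi
      rw [PySem.List.mem_pyRange_one] at hi
      simp [not_le.mpr hi.2]
  have hB : (PySem.List.pyRange (n - r) n 1).map (fun i => if n - r ≤ i then q + 1 else q)
      = List.replicate r.toNat (q + 1) := by
    rw [List.map_congr_left (g := fun _ => q + 1) ?_, map_const_range]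
    · congr 1; omega
    · intro i hi
      rw [PySem.List.mem_pyRange_one] at hi
      simp [hi.1]
  rw [hA, hB]
  simp

-- B's greedy loop produces the two uniform blocks (after the reverse), for n > 0
lemma goGreedy_block (k : Nat) : ∀ (n s : Int) (out : List Int), n.toNat = k → 0 < n →
    goGreedy n s out
    = (List.replicate (n - PySem.Int.mod s n).toNat (PySem.Int.floordiv s n)
      ++ List.replicate (PySem.Int.mod s n).toNat (PySem.Int.floordiv s n + 1)) ++ out.reverse := by
  induction k with
  | zero => intro n s out hk hpos; omega
  | succ k ih =>
    intro n s out hk hpos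
    set q := PySem.Int.floordiv s n with hq
    set r := PySem.Int.mod s n with hr
    have hid : q * n + r = s := PySem.Int.floordiv_mul_add_mod s n
    have hge : 0 ≤ r := PySem.Int.mod_nonneg (a := s) hpos
    have hlt : r < n := PySem.Int.mod_lt (a := s) hpos
    rw [goGreedy]
    simp only [not_le.mpr hpos, if_false]
    by_cases hr0 : r = 0
    · -- ceiling = q; recursive sum is q*(n-1)
      have hc : -(PySem.Int.floordiv (-s) n) = q := by
        rw [PySem.Int.neg_floordiv_neg_eq_iff_of_pos (hb := hpos)]
        constructor <;> nlinarith
      rw [hc]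
      by_cases hn1 : n = 1
      · subst hn1
        rw [goGreedy]
        simp only [hr0]
        have : q = s := by omega
        simp [this]
      · have hpos' : 0 < n - 1 := by omega
        have hq' : PySem.Int.floordiv (s - q) (n - 1) = q := by
          rw [PySem.Int.floordiv_eq_iff_of_pos (hb := hpos')]
          constructor <;> nlinarith
        have hr' : PySem.Int.mod (s - q) (n - 1) = 0 := by
          have := PySem.Int.floordiv_mul_add_mod (s - q) (n - 1)
          rw [hq'] at this; nlinarith
        rw [ih (n - 1) (s - q) (out ++ [q]) (by omega) hpos', hq', hr']
        simp only [hr0, List.reverse_append, List.reverse_singleton,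
          List.replicate_zero, List.append_nil, Int.toNat_zero]
        rw [show (n - 0).toNat = (n - 1 - 0).toNat + 1 by omega, List.replicate_succ']
        simp
    · -- ceiling = q + 1; remainder shrinks by one
      have hrpos : 0 < r := lt_of_le_of_ne hge (Ne.symm hr0)
      have hc : -(PySem.Int.floordiv (-s) n) = q + 1 := by
        rw [PySem.Int.neg_floordiv_neg_eq_iff_of_pos (hb := hpos)]
        constructor <;> nlinarith
      rw [hc]
      have hpos' : 0 < n - 1 := by omega
      have hq' : PySem.Int.floordiv (s - (q + 1)) (n - 1) = q := by
        rw [PySem.Int.floordiv_eq_iff_of_pos (hb := hpos')]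
        constructor <;> nlinarith
      have hr' : PySem.Int.mod (s - (q + 1)) (n - 1) = r - 1 := by
        have := PySem.Int.floordiv_mul_add_mod (s - (q + 1)) (n - 1)
        rw [hq'] at this; nlinarith
      rw [ih (n - 1) (s - (q + 1)) (out ++ [q + 1]) (by omega) hpos', hq', hr']
      rw [show (n - 1 - (r - 1)).toNat = (n - r).toNat by omega,
        show r.toNat = (r - 1).toNat + 1 by omega, List.replicate_succ']
      simp

-- ===== VERDICT (by name: the statement is the Claim_ definition above) =====
theorem solution_spec : Claim_equal_solution := by
  intro n s _ hn
  unfold Spec_solution solution solution_alt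
  by_cases hq0 : PySem.Int.floordiv s n = 0
  · simp [hq0]
  · simp only [hq0, if_false]
    rcases lt_or_gt_of_ne hn with hneg | hpos
    · -- n < 0: A's range is empty, B's recursion stops immediately
      rw [PySem.List.pyRange_one_eq_nil (by omega), goGreedy]
      simp [le_of_lt hneg]
    · rw [loop_block n s hpos, goGreedy_block n.toNat n s [] rfl hpos]
      simp
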